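-- pv_equiv track=rewrite | github.com/daniel-reich/turbo-robot | AvP94XqJvPjoMk5PT_8.py | unique_styles
-- ===== SOURCE A (Python) =====
-- def unique_styles(albums):
--   d = dict()
--   total = 0
--   for i in range(len(albums)):
--     l = albums[i].split(',')
--     for j in l:
--       if d.get(j) == None:
--         d.update({j: 0})
--         total = total + 1
--       else:
--         d.update({j: d.get(j)+1})
--   return total
-- ===== SOURCE B (Python) =====
-- def unique_styles(albums):
--     tokens = []
--     for album in albums:
--         tokens.extend(album.split(','))
--     tokens.sort()
--     count = 0
--     prev = None
--     for t in tokens: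
--         if prev != t:
--             count += 1
--         prev = t
--     return count
-- ===== Notes on version B (the rewrite author's own statement) =====
-- stated objective: alternative
-- what changed: Replaces the dict-of-counts with a sort of the flattened token list followed by a single linear scan that counts changes of adjacent values; distinctness is detected by ordering, not by a hash table.
import Mathlib
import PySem

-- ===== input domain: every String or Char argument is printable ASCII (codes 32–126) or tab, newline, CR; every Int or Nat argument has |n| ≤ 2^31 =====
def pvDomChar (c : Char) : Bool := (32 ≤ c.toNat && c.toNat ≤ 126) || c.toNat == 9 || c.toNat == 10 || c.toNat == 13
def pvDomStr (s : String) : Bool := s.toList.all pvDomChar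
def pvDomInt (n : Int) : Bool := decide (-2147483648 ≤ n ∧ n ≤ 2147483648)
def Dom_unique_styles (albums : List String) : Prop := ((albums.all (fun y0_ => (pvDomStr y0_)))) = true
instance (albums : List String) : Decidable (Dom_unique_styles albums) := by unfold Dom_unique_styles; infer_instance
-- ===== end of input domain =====

-- B counts distinct styles by sorting the flattened token list and scanning adjacent changes,
-- instead of A's dict-of-counts; alternative algorithm, same results.


-- shared primitive: Python's s.split(',') (separator "," is nonempty, so split? is always some)
def pySplitComma (s : String) : List String := (PySem.Str.split? s ",").getD []

-- ===== PORT A =====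
def unique_styles (albums : List String) : Int :=
  (PySem.List.pyRange 0 (albums.length : Int) 1).foldl
    (fun (st : PySem.Dict String Int × Int) i =>
      let l := pySplitComma (PySem.List.pyGetD albums i "")
      l.foldl
        (fun (st : PySem.Dict String Int × Int) j =>
          if st.1.get? j = none then (st.1.insert j 0, st.2 + 1)
          else (st.1.insert j ((st.1.get? j).getD 0 + 1), st.2))
        st)
    (PySem.Dict.empty, 0) |>.2

-- ===== PORT B =====
def unique_styles_alt (albums : List String) : Int :=
  let tokens := albums.foldl (fun acc a => acc ++ pySplitComma a) []
  let s := PySem.List.sorted tokens (fun x => x) false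
  (s.foldl
    (fun (st : Int × Option String) t =>
      (if st.2 = some t then st.1 else st.1 + 1, some t))
    (0, none)) |>.1

-- ===== PRECONDITION & SPEC =====
def Spec_unique_styles (albums : List String) (out : Int) : Prop := out = unique_styles_alt albums
instance (albums : List String) (out : Int) : Decidable (Spec_unique_styles albums out) := by unfold Spec_unique_styles; infer_instance

-- ===== CLAIM (what is proved, stated in full; the proofs are below) =====
def Claim_equal_unique_styles : Prop := ∀ (albums : List String), Dom_unique_styles albums → Spec_unique_styles albums (unique_styles albums)

-- ===== LEMMAS AND PROOFS =====

-- A's loop step / B's loop step, named for the lemmas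
def aStep (st : PySem.Dict String Int × Int) (j : String) : PySem.Dict String Int × Int :=
  if st.1.get? j = none then (st.1.insert j 0, st.2 + 1)
  else (st.1.insert j ((st.1.get? j).getD 0 + 1), st.2)

def bStep (st : Int × Option String) (t : String) : Int × Option String :=
  (if st.2 = some t then st.1 else st.1 + 1, some t)

-- nested foldl over per-album token lists = one foldl over the flattened list
theorem foldl_nested_flatMap {α β γ : Type} (g : β → List α) (f : γ → α → γ) :
    ∀ (l : List β) (init : γ),
      l.foldl (fun st b => (g b).foldl f st) init = (l.flatMap g).foldl f init := by
  intro l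
  induction l with
  | nil => intro init; rfl
  | cons b r ih => intro init; simp [List.flatMap_cons, List.foldl_append, ih]

-- A-side invariant: the counter grows by the number of tokens not yet keys of d
theorem a_invariant :
    ∀ (ts : List String) (d : PySem.Dict String Int) (t : Int),
      (ts.foldl aStep (d, t)).2
        = t + (((ts.toFinset.filter (fun y => d.get? y = none)).card : Int)) := by
  intro ts
  induction ts with
  | nil => intro d t; simp
  | cons x r ih =>
    intro d t
    by_cases hx : d.get? x = none
    · have h1 : (r.foldl aStep (d.insert x 0, t + 1)).2
          = t + 1 + ((r.toFinset.filter (fun y => (d.insert x 0).get? y = none)).card : Int) :=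
        ih (d.insert x 0) (t + 1)
      have hstep : aStep (d, t) x = (d.insert x 0, t + 1) := by simp [aStep, hx]
      rw [List.foldl_cons, hstep, h1, List.toFinset_cons]
      have hpred : r.toFinset.filter (fun y => (d.insert x 0).get? y = none)
          = r.toFinset.filter (fun y => y ≠ x ∧ d.get? y = none) := by
        apply Finset.filter_congr
        intro y _
        rw [PySem.Dict.get?_insert]
        by_cases he : y = x <;> simp [he]
      rw [hpred]
      have hcard : ((insert x r.toFinset).filter (fun y => d.get? y = none)).card
          = (r.toFinset.filter (fun y => y ≠ x ∧ d.get? y = none)).card + 1 := by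
        have h1 : (insert x r.toFinset).filter (fun y => d.get? y = none)
            = insert x (r.toFinset.filter (fun y => y ≠ x ∧ d.get? y = none)) := by
          ext y
          simp only [Finset.mem_filter, Finset.mem_insert]
          constructor
          · rintro ⟨(rfl | hm), hp⟩
            · exact Or.inl rfl
            · by_cases hyx : y = x
              · exact Or.inl hyx
              · exact Or.inr ⟨hm, hyx, hp⟩
          · rintro (rfl | ⟨hm, hne, hp⟩)
            · exact ⟨Or.inl rfl, hx⟩
            · exact ⟨Or.inr hm, hp⟩
        rw [h1, Finset.card_insert_of_notMem (by simp)]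
      rw [hcard]
      push_cast
      ring
    · have h1 := ih (d.insert x ((d.get? x).getD 0 + 1)) t
      have hstep : aStep (d, t) x = (d.insert x ((d.get? x).getD 0 + 1), t) := by
        simp [aStep, hx]
      rw [List.foldl_cons, hstep, h1, List.toFinset_cons]
      have hpred : r.toFinset.filter (fun y => (d.insert x ((d.get? x).getD 0 + 1)).get? y = none)
          = r.toFinset.filter (fun y => d.get? y = none) := by
        apply Finset.filter_congr
        intro y _
        rw [PySem.Dict.get?_insert]
        by_cases he : y = x <;> simp [he, hx]
      rw [hpred, Finset.filter_insert, if_neg hx]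

-- B-side invariant on a sorted list, previous element carried in the state
theorem b_invariant :
    ∀ (s : List String), s.Pairwise (· ≤ ·) →
      (∀ (c : Int) (p : String), (∀ x ∈ s, p ≤ x) →
        (s.foldl bStep (c, some p)).1 = c + ((s.toFinset.erase p).card : Int))
      ∧ (∀ c : Int, (s.foldl bStep (c, none)).1 = c + ((s.toFinset.card : Int))) := by
  intro s
  induction s with
  | nil => intro _; exact ⟨fun c p _ => by simp, fun c => by simp⟩
  | cons x r ih =>
    intro hpw
    have hxr : ∀ y ∈ r, x ≤ y := by
      intro y hy; exact (List.pairwise_cons.mp hpw).1 y hy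
    have ihr := ih (List.pairwise_cons.mp hpw).2
    have hsome : ∀ (c : Int) (p : String), (∀ y ∈ x :: r, p ≤ y) →
        ((x :: r).foldl bStep (c, some p)).1 = c + (((x :: r).toFinset.erase p).card : Int) := by
      intro c p hp
      by_cases hpx : p = x
      · subst hpx
        have hstep : bStep (c, some p) p = (c, some p) := by simp [bStep]
        rw [List.foldl_cons, hstep]
        rw [ihr.1 c p hxr]
        have hset : ((p :: r).toFinset).erase p = r.toFinset.erase p := by
          ext y
          simp only [List.toFinset_cons, Finset.mem_erase, Finset.mem_insert,
            List.mem_toFinset]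
          tauto
        rw [hset]
      · have hne : some p ≠ some x := by simpa using hpx
        have hstep : bStep (c, some p) x = (c + 1, some x) := by simp [bStep, hne]
        rw [List.foldl_cons, hstep]
        rw [ihr.1 (c + 1) x hxr]
        have hpn : p ∉ (x :: r).toFinset := by
          simp only [List.toFinset_cons, Finset.mem_insert, List.mem_toFinset]
          rintro (h | h)
          · exact hpx h
          · exact hpx (le_antisymm (hp x List.mem_cons_self) (hxr p h))
        rw [Finset.erase_eq_of_notMem hpn]
        have hcard : ((x :: r).toFinset.card : Int) = ((r.toFinset.erase x).card : Int) + 1 := by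
          have : (x :: r).toFinset = insert x (r.toFinset.erase x) := by
            ext y
            simp only [List.toFinset_cons, Finset.mem_insert, Finset.mem_erase,
              List.mem_toFinset]
            by_cases hyx : y = x <;> simp [hyx]
          rw [this, Finset.card_insert_of_notMem (Finset.notMem_erase x _)]
          push_cast; ring
        rw [hcard]; ring
    refine ⟨hsome, ?_⟩
    intro c
    have hstep : bStep (c, none) x = (c + 1, some x) := by simp [bStep]
    rw [List.foldl_cons, hstep, ihr.1 (c + 1) x hxr]
    have hcard : (((x :: r).toFinset.card : Int)) = ((r.toFinset.erase x).card : Int) + 1 := by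
      have : (x :: r).toFinset = insert x (r.toFinset.erase x) := by
        ext y
        simp only [List.toFinset_cons, Finset.mem_insert, Finset.mem_erase, List.mem_toFinset]
        by_cases hyx : y = x <;> simp [hyx]
      rw [this, Finset.card_insert_of_notMem (Finset.notMem_erase x _)]
      push_cast; ring
    rw [hcard]; ring

-- ===== VERDICT (by name: the statement is the Claim_ definition above) =====
theorem unique_styles_spec : Claim_equal_unique_styles := by
  intro albums _
  show unique_styles albums = unique_styles_alt albums
  have hA : unique_styles albums
      = ((albums.flatMap pySplitComma).foldl aStep (PySem.Dict.empty, 0)).2 := by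
    show ((PySem.List.pyRange 0 (albums.length : Int) 1).foldl
        (fun st i => (pySplitComma (PySem.List.pyGetD albums i "")).foldl aStep st)
        (PySem.Dict.empty, 0)).2 = _
    rw [PySem.List.foldl_pyRange_zero_pyGetD' albums ""
          (fun st x => (pySplitComma x).foldl aStep st) (PySem.Dict.empty, (0 : Int)),
        foldl_nested_flatMap]
  have hB : unique_styles_alt albums
      = ((PySem.List.sorted (albums.flatMap pySplitComma) (fun x => x) false).foldl
          bStep ((0 : Int), none)).1 := by
    show ((PySem.List.sorted (albums.foldl (fun acc a => acc ++ pySplitComma a) [])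
          (fun x => x) false).foldl bStep ((0 : Int), none)).1 = _
    rw [PySem.List.foldl_append_eq_flatMap pySplitComma albums []]
    rfl
  rw [hA, hB, a_invariant]
  have hpw := PySem.List.sorted_pairwise (albums.flatMap pySplitComma) (fun x => x)
  rw [(b_invariant _ hpw).2 0,
      List.toFinset_eq_of_perm _ _ (PySem.List.sorted_perm (albums.flatMap pySplitComma) (fun x => x) false)]
  simp [PySem.Dict.get?_empty]
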